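-- pv_equiv track=rewrite | github.com/vishakhaxd/Competitive-Programming | 2050a.py | fn
-- ===== SOURCE A (Python) =====
-- def fn(m, words):
--     total_length= 0
--     count = 0
--     for w in words:
--         word_length = len(w)
--         if total_length + word_length  <= m:
--             total_length += word_length
--             count += 1
--         else:
--             break
--     return count
-- ===== SOURCE B (Python) =====
-- def fn(m, words):
--     # Build the list of cumulative prefix lengths, then binary-search for
--     # the rightmost prefix sum <= m (bisect_right by hand, no imports).
--     prefix = []
--     t = 0
--     for w in words:
--         t += len(w)
--         prefix.append(t)
--     lo, hi = 0, len(prefix)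
--     while lo < hi:
--         mid = (lo + hi) // 2
--         if m < prefix[mid]:
--             hi = mid
--         else:
--             lo = mid + 1
--     return lo
-- ===== Notes on version B (the rewrite author's own statement) =====
-- stated objective: alternative
-- what changed: B replaces A's conditional-accumulate-with-break loop by building the cumulative-length table in one pass and then binary searching (bisect_right) for the number of prefix sums <= m, relying on the sums being monotone.
import Mathlib
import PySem

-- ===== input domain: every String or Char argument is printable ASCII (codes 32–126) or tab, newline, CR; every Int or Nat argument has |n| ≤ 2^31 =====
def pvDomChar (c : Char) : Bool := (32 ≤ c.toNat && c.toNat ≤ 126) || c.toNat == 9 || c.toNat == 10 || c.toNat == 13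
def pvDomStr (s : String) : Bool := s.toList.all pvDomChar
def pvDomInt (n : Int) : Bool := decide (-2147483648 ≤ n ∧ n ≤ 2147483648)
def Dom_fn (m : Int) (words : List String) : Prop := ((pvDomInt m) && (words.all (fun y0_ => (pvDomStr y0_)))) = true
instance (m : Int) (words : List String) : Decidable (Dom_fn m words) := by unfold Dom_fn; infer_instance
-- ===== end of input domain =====

-- B replaces A's accumulate-until-overflow loop (with break) by building the cumulative-length
-- table and then binary-searching it (bisect_right, written out since A imports nothing);
-- objective: alternative decomposition, same O(n) cost.

-- ===== PORT A =====
-- the for-loop of A with its `break`: state = (total_length, count)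
def fnLoop (m : Int) (total count : Int) (ws : List String) : Int :=
  match ws with
  | [] => count
  | w :: rest =>
    let wl : Int := PySem.Str.len w
    if total + wl ≤ m then fnLoop m (total + wl) (count + 1) rest
    else count

def fn (m : Int) (words : List String) : Int := fnLoop m 0 0 words

-- ===== PORT B =====
-- the first loop of B: append the running total for each word (prefix.append(t))
def accumFrom (t : Int) (ws : List String) : List Int :=
  match ws with
  | [] => []
  | w :: rest => (t + PySem.Str.len w) :: accumFrom (t + PySem.Str.len w) rest

-- the while-loop of B (hand-written bisect_right); prefix[mid] is always in range when
-- called with lo ≤ hi ≤ len, so getD with default 0 is exact there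
def bisectLoop (a : List Int) (x : Int) (lo hi : Nat) : Nat :=
  if _h : lo < hi then
    let mid := (lo + hi) / 2
    if x < a.getD mid 0 then bisectLoop a x lo mid
    else bisectLoop a x (mid + 1) hi
  else lo
termination_by hi - lo
decreasing_by all_goals omega

def fn_alt (m : Int) (words : List String) : Int :=
  let pref := accumFrom 0 words
  (bisectLoop pref m 0 pref.length : Int)

-- ===== PRECONDITION & SPEC =====
def Spec_fn (m : Int) (words : List String) (out : Int) : Prop := out = fn_alt m words
instance (m : Int) (words : List String) (out : Int) : Decidable (Spec_fn m words out) := by unfold Spec_fn; infer_instance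

-- ===== CLAIM (what is proved, stated in full; the proofs are below) =====
def Claim_equal_fn : Prop := ∀ (m : Int) (words : List String), Dom_fn m words → Spec_fn m words (fn m words)

-- ===== LEMMAS AND PROOFS =====

-- A's loop counts the leading prefix sums (starting from t) that stay ≤ m
theorem fnLoop_eq_takeWhile (m : Int) : ∀ (ws : List String) (t c : Int),
    fnLoop m t c ws = c + ((accumFrom t ws).takeWhile (fun a => decide (a ≤ m))).length := by
  intro ws
  induction ws with
  | nil => intro t c; simp [fnLoop, accumFrom]
  | cons w rest ih =>
    intro t c
    rw [show fnLoop m t c (w :: rest)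
        = if t + PySem.Str.len w ≤ m then fnLoop m (t + PySem.Str.len w) (c + 1) rest else c
      from rfl]
    rw [show accumFrom t (w :: rest)
        = (t + PySem.Str.len w) :: accumFrom (t + PySem.Str.len w) rest from rfl]
    by_cases h : t + PySem.Str.len w ≤ m
    · rw [if_pos h, ih, List.takeWhile_cons_of_pos (by simpa using h)]
      simp only [List.length_cons]
      push_cast
      ring
    · rw [if_neg h, List.takeWhile_cons_of_neg (by simpa using h)]
      simp

theorem str_len_nonneg (w : String) : 0 ≤ PySem.Str.len w := by
  rw [PySem.Str.len_eq]
  exact Int.natCast_nonneg _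

theorem accumFrom_lb : ∀ (ws : List String) (t : Int), ∀ y ∈ accumFrom t ws, t ≤ y := by
  intro ws
  induction ws with
  | nil => intro t y hy; simp [accumFrom] at hy
  | cons w rest ih =>
    intro t y hy
    simp only [accumFrom, List.mem_cons] at hy
    rcases hy with h | h
    · have := str_len_nonneg w; omega
    · have := ih (t + PySem.Str.len w) y h
      have := str_len_nonneg w; omega

theorem accumFrom_pairwise : ∀ (ws : List String) (t : Int),
    (accumFrom t ws).Pairwise (· ≤ ·) := by
  intro ws
  induction ws with
  | nil => intro t; simp [accumFrom]
  | cons w rest ih =>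
    intro t
    simp only [accumFrom, List.pairwise_cons]
    refine ⟨?_, ih _⟩
    intro y hy
    exact accumFrom_lb rest _ y hy

theorem pairwise_getD_mono (a : List Int) (h : a.Pairwise (· ≤ ·)) :
    ∀ i j : Nat, i ≤ j → j < a.length → a.getD i 0 ≤ a.getD j 0 := by
  intro i j hij hj
  have hi : i < a.length := lt_of_le_of_lt (by omega) hj
  rw [List.getD_eq_getElem a 0 hi, List.getD_eq_getElem a 0 hj]
  rcases Nat.lt_or_ge i j with h' | h'
  · exact List.pairwise_iff_getElem.mp h i j hi hj h'
  · have : i = j := by omega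
    subst this; rfl

-- invariant of B's binary-search loop
theorem bisectLoop_inv (a : List Int) (x : Int)
    (mono : ∀ i j : Nat, i ≤ j → j < a.length → a.getD i 0 ≤ a.getD j 0) :
    ∀ lo hi : Nat, lo ≤ hi → hi ≤ a.length →
    (∀ i : Nat, i < lo → a.getD i 0 ≤ x) →
    (∀ i : Nat, hi ≤ i → i < a.length → x < a.getD i 0) →
    bisectLoop a x lo hi ≤ a.length ∧
    (∀ i : Nat, i < bisectLoop a x lo hi → a.getD i 0 ≤ x) ∧
    (bisectLoop a x lo hi < a.length → x < a.getD (bisectLoop a x lo hi) 0) := by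
  intro lo hi
  fun_induction bisectLoop a x lo hi with
  | case1 lo hi hlt mid hx ih =>
    intro _ hhi hbelow habove
    exact ih (by omega) (by omega) hbelow
      (fun i hmidi hilen => lt_of_lt_of_le hx (mono mid i hmidi hilen))
  | case2 lo hi hlt mid hx ih =>
    intro _ hhi hbelow habove
    have hmid : mid < a.length := by omega
    have hmx : a.getD mid 0 ≤ x := le_of_not_gt hx
    exact ih (by omega) hhi
      (fun i hi' => le_trans (mono i mid (by omega) hmid) hmx) habove
  | case3 lo hi hnlt =>
    intro hle hhi hbelow habove
    have : lo = hi := by omega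
    subst this
    exact ⟨hhi, hbelow, fun h => habove lo (le_refl _) h⟩

-- the takeWhile length has the same two characteristic properties
theorem takeWhile_props (m : Int) : ∀ (a : List Int),
    ((a.takeWhile (fun v => decide (v ≤ m))).length ≤ a.length) ∧
    (∀ i : Nat, i < (a.takeWhile (fun v => decide (v ≤ m))).length → a.getD i 0 ≤ m) ∧
    ((a.takeWhile (fun v => decide (v ≤ m))).length < a.length →
      m < a.getD (a.takeWhile (fun v => decide (v ≤ m))).length 0) := by
  intro a
  induction a with
  | nil => simp
  | cons v rest ih =>
    obtain ⟨h1, h2, h3⟩ := ih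
    by_cases h : v ≤ m
    · rw [List.takeWhile_cons_of_pos (by simpa using h)]
      simp only [List.length_cons]
      refine ⟨by omega, ?_, ?_⟩
      · intro i hi
        cases i with
        | zero => simpa using h
        | succ k => simpa using h2 k (by omega)
      · intro hlen
        simpa using h3 (by omega)
    · rw [List.takeWhile_cons_of_neg (by simpa using h)]
      simp only [List.length_nil, List.length_cons]
      exact ⟨by omega, by omega, fun _ => by simpa using not_le.mp h⟩

-- ===== VERDICT (by name: the statement is the Claim_ definition above) =====
theorem fn_spec : Claim_equal_fn := by
  intro m words _
  unfold Spec_fn fn fn_alt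
  rw [fnLoop_eq_takeWhile m words 0 0, zero_add]
  set a := accumFrom 0 words with ha
  have mono := pairwise_getD_mono a (accumFrom_pairwise words 0)
  have hb := bisectLoop_inv a m mono 0 a.length (Nat.zero_le _) (le_refl _)
    (by omega) (by omega)
  have ht := takeWhile_props m a
  set k := (a.takeWhile (fun v => decide (v ≤ m))).length with hk
  set r := bisectLoop a m 0 a.length with hr
  obtain ⟨hr1, hr2, hr3⟩ := hb
  obtain ⟨ht1, ht2, ht3⟩ := ht
  have : k = r := by
    rcases Nat.lt_trichotomy k r with h | h | h
    · have h1 := hr2 k h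
      have h2 := ht3 (by omega)
      omega
    · exact h
    · have h1 := ht2 r h
      have h2 := hr3 (by omega)
      omega
  show ((k : Int)) = ((bisectLoop a m 0 a.length : Nat) : Int)
  exact_mod_cast this
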